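-- pv_equiv track=rewrite | github.com/LMFDB/lmfdb | lmfdb/shimura_curves/web_curve.py | formatted_dims
-- ===== SOURCE A (Python) =====
-- from collections import Counter
--
-- def showexp(c, wrap=True):
--     if c == 1:
--         return ""
--     elif wrap:
--         return f"$^{{{c}}}$"
--     else:
--         return f"^{{{c}}}"
--
-- def formatted_dims(dims, mults):
--     if dims is None:
--         return "not computed"
--     if not dims:
--         return ""
--     # Collapse newforms with the same dimension
--     collapsed = Counter()
--     for d, c in zip(dims, mults):
--         collapsed[d] += c
--     dims, mults = zip(*(sorted(collapsed.items())))
--     return "$" + r"\cdot".join(f"{d}{showexp(c, wrap=False)}" for (d, c) in zip(dims, mults)) + "$"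
-- ===== SOURCE B (Python) =====
-- def showexp(c, wrap=True):
--     if c == 1:
--         return ""
--     elif wrap:
--         return f"$^{{{c}}}$"
--     else:
--         return f"^{{{c}}}"
--
-- def formatted_dims(dims, mults):
--     if dims is None:
--         return "not computed"
--     if not dims:
--         return ""
--     # Sort the (dimension, multiplicity) pairs by dimension, then collapse
--     # adjacent runs of equal dimension in one pass (no dict/Counter needed).
--     pairs = sorted(zip(dims, mults), key=lambda p: p[0])
--     parts = []
--     i = 0
--     n = len(pairs)
--     while i < n:
--         d = pairs[i][0]
--         total = 0
--         while i < n and pairs[i][0] == d: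
--             total += pairs[i][1]
--             i += 1
--         parts.append(f"{d}{showexp(total, wrap=False)}")
--     return "$" + r"\cdot".join(parts) + "$"
-- ===== Notes on version B (the rewrite author's own statement) =====
-- stated objective: alternative
-- what changed: B replaces A's Counter hash accumulation followed by sorting the collapsed items with a sort of the raw (dimension, multiplicity) pairs followed by a single adjacent-run pass that sums each run of equal dimensions, so no dictionary is ever built; output formatting is unchanged.
import Mathlib
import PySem

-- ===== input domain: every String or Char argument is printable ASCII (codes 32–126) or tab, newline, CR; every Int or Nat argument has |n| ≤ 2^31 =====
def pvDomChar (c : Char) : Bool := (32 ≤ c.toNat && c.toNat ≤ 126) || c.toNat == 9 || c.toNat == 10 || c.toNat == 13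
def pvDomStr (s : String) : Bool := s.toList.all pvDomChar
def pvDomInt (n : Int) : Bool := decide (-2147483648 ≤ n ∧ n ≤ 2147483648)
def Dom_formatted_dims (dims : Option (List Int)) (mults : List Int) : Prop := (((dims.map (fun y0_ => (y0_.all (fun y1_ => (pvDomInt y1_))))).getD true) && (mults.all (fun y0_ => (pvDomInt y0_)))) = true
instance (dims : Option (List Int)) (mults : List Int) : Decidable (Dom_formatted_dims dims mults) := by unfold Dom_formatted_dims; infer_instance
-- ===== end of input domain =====

-- B collapses equal dimensions by sorting the raw pairs and summing adjacent runs instead of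
-- A's Counter-then-sort; return values agree on all inputs where A returns (alternative, not faster).

-- ===== PORT A =====
-- showexp(c, wrap) from the module, as A uses it
def showexpA (c : Int) (wrap : Bool) : String :=
  if c = 1 then ""
  else if wrap then "$^{" ++ PySem.Int.toStr c ++ "}$"
  else "^{" ++ PySem.Int.toStr c ++ "}"

def formatted_dims (dims : Option (List Int)) (mults : List Int) : String :=
  match dims with
  | none => "not computed"
  | some ds =>
    if ds = [] then ""
    else
      -- collapsed = Counter(); for d, c in zip(dims, mults): collapsed[d] += c
      let collapsed : PySem.Dict Int Int :=
        (ds.zip mults).foldl (fun d p => d.modify p.1 0 (· + p.2)) PySem.Dict.empty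
      -- dims, mults = zip(*(sorted(collapsed.items())))  — the later zip(dims, mults)
      -- re-pairs exactly this sorted item list (tuple sort = sorted2 by fst then snd)
      let items := PySem.List.sorted2 collapsed.items Prod.fst Prod.snd
      "$" ++ PySem.Str.join "\\cdot" (items.map (fun p => PySem.Int.toStr p.1 ++ showexpA p.2 false)) ++ "$"

-- ===== PORT B =====
def showexpB (c : Int) (wrap : Bool) : String :=
  if c = 1 then ""
  else if wrap then "$^{" ++ PySem.Int.toStr c ++ "}$"
  else "^{" ++ PySem.Int.toStr c ++ "}"

-- the inner while-loop of Source B: consume one run of equal dimensions, summing multiplicities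
def collapseRuns : List (Int × Int) → List (Int × Int)
  | [] => []
  | p :: rest =>
      let run := rest.takeWhile (fun q => q.1 == p.1)
      (p.1, p.2 + (run.map Prod.snd).sum) :: collapseRuns (rest.dropWhile (fun q => q.1 == p.1))
termination_by l => l.length
decreasing_by simpa using Nat.lt_succ_of_le (List.length_dropWhile_le _ _)

def formatted_dims_alt (dims : Option (List Int)) (mults : List Int) : String :=
  match dims with
  | none => "not computed"
  | some ds =>
    if ds = [] then ""
    else
      let pairs := PySem.List.sorted (ds.zip mults) Prod.fst
      let parts := (collapseRuns pairs).map (fun p => PySem.Int.toStr p.1 ++ showexpB p.2 false)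
      "$" ++ PySem.Str.join "\\cdot" parts ++ "$"

-- ===== PRECONDITION & SPEC =====
-- Pre_ excludes exactly the inputs where Python A raises ValueError: a non-empty dims with
-- mults = [] makes zip empty, so 'zip(*sorted(collapsed.items()))' unpacks nothing.
def Pre_formatted_dims (dims : Option (List Int)) (mults : List Int) : Prop :=
  dims = none ∨ dims = some [] ∨ mults ≠ []
instance (dims : Option (List Int)) (mults : List Int) : Decidable (Pre_formatted_dims dims mults) := by unfold Pre_formatted_dims; infer_instance

def pvWitness_formatted_dims : Option (List Int) × List Int := (some [2, 1, 2], [1, 3, 2])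

def Spec_formatted_dims (dims : Option (List Int)) (mults : List Int) (out : String) : Prop := out = formatted_dims_alt dims mults
instance (dims : Option (List Int)) (mults : List Int) (out : String) : Decidable (Spec_formatted_dims dims mults out) := by unfold Spec_formatted_dims; infer_instance

-- ===== CLAIM (what is proved, stated in full; the proofs are below) =====
def Claim_equal_formatted_dims : Prop := ∀ (dims : Option (List Int)) (mults : List Int), Dom_formatted_dims dims mults → Pre_formatted_dims dims mults → Spec_formatted_dims dims mults (formatted_dims dims mults)

-- ===== LEMMAS AND PROOFS =====

-- total multiplicity that both programs attach to dimension k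
def pvSsum (l : List (Int × Int)) (k : Int) : Int :=
  ((l.filter (fun p => p.1 == k)).map Prod.snd).sum

theorem pvSsum_cons (p : Int × Int) (l : List (Int × Int)) (k : Int) :
    pvSsum (p :: l) k = (if p.1 = k then p.2 else 0) + pvSsum l k := by
  by_cases h : p.1 = k <;> simp [pvSsum, h]

theorem pvSsum_perm {l l' : List (Int × Int)} (h : l.Perm l') (k : Int) :
    pvSsum l k = pvSsum l' k :=
  List.Perm.sum_eq (List.Perm.map _ (List.Perm.filter _ h))

-- ---- A side: the Counter loop ----

theorem getD_fold (l : List (Int × Int)) (d0 : PySem.Dict Int Int) (k : Int) :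
    (l.foldl (fun d p => d.modify p.1 0 (· + p.2)) d0).getD k 0 = d0.getD k 0 + pvSsum l k := by
  induction l generalizing d0 with
  | nil => simp [pvSsum]
  | cons p l ih =>
    rw [List.foldl_cons, ih, pvSsum_cons]
    by_cases h : p.1 = k
    · subst h; rw [PySem.Dict.getD_modify_self, if_pos rfl]; ring
    · rw [PySem.Dict.getD_modify_of_ne _ _ _ (Ne.symm h), if_neg h]; ring

theorem keys_fold (l : List (Int × Int)) (d0 : PySem.Dict Int Int) :
    (l.foldl (fun d p => d.modify p.1 0 (· + p.2)) d0).keys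
      = (l.map Prod.fst).foldl PySem.Set.add d0.keys := by
  induction l generalizing d0 with
  | nil => rfl
  | cons p l ih =>
    rw [List.foldl_cons, ih, List.map_cons, List.foldl_cons]
    congr 1
    by_cases h : d0.contains p.1
    · have hm : p.1 ∈ d0.keys := (PySem.Dict.contains_iff_mem_keys d0 p.1).mp h
      rw [PySem.Dict.modify, PySem.Dict.keys_insert_of_contains _ _ h]
      simp [PySem.Set.add, PySem.Set.contains, hm]
    · have hm : p.1 ∉ d0.keys := fun hmem => h ((PySem.Dict.contains_iff_mem_keys d0 p.1).mpr hmem)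
      rw [PySem.Dict.modify, PySem.Dict.keys_insert_of_not_contains _ _ (by simpa using h)]
      simp [PySem.Set.add, PySem.Set.contains, hm]

theorem itemsA (pairs : List (Int × Int)) :
    ((pairs.foldl (fun d p => d.modify p.1 0 (· + p.2)) PySem.Dict.empty).items)
      = (PySem.Set.ofList (pairs.map Prod.fst)).map (fun k => (k, pvSsum pairs k)) := by
  have hkeys : (pairs.foldl (fun d p => d.modify p.1 0 (· + p.2)) PySem.Dict.empty).keys
      = PySem.Set.ofList (pairs.map Prod.fst) := by
    rw [keys_fold]; rfl
  have hnd : (pairs.foldl (fun d p => d.modify p.1 0 (· + p.2)) PySem.Dict.empty).keys.Nodup := by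
    rw [hkeys]; exact PySem.Set.nodup_ofList _
  rw [PySem.Dict.items_eq_map_keys _ hnd 0, hkeys]
  exact List.map_congr_left (fun k _ => by rw [getD_fold]; simp)

-- ---- sorted2 over distinct first components: named order uniqueness ----

def pvLexLe (a b : Int × Int) : Prop := a.1 < b.1 ∨ (a.1 = b.1 ∧ a.2 ≤ b.2)

theorem insertBy_lex_pairwise (x : Int × Int) (ys : List (Int × Int))
    (h : ys.Pairwise pvLexLe) :
    (PySem.List.insertBy
        (fun a b => decide (a.1 < b.1) || (!decide (b.1 < a.1) && decide (a.2 < b.2))) x ys).Pairwise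
      pvLexLe := by
  induction ys with
  | nil => simp [PySem.List.insertBy]
  | cons y ys ih =>
    rw [List.pairwise_cons] at h
    rw [PySem.List.insertBy]
    cases hb : (decide (x.1 < y.1) || (!decide (y.1 < x.1) && decide (x.2 < y.2))) with
    | true =>
      rw [if_pos rfl]
      rw [List.pairwise_cons]
      refine ⟨?_, List.Pairwise.cons h.1 h.2⟩
      intro z hz
      have hxy : pvLexLe x y := by
        simp only [Bool.or_eq_true, Bool.and_eq_true, Bool.not_eq_true', decide_eq_true_eq,
          decide_eq_false_iff_not] at hb
        unfold pvLexLe; omega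
      rcases hz with _ | hz
      · exact hxy
      · have hyz := h.1 z (by assumption)
        unfold pvLexLe at *; omega
    | false =>
      rw [if_neg (by simp)]
      rw [List.pairwise_cons]
      refine ⟨?_, ih h.2⟩
      intro z hz
      rcases (PySem.List.insertBy_mem_iff _ x z ys).mp hz with heq | hz
      · rw [heq]
        have hb' : ¬(x.1 < y.1) ∧ (y.1 < x.1 ∨ ¬(x.2 < y.2)) := by
            simp only [Bool.or_eq_false_iff, Bool.and_eq_false_iff] at hb
            rcases hb with ⟨h1, h2⟩
            constructor
            · simpa using h1
            · rcases h2 with h2 | h2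
              · left; simpa using h2
              · right; simpa using h2
        unfold pvLexLe; omega
      · exact h.1 z hz

theorem foldl_insertBy_lex_pairwise (xs acc : List (Int × Int)) (h : acc.Pairwise pvLexLe) :
    (xs.foldl (fun acc x =>
        PySem.List.insertBy
          (fun a b => decide (a.1 < b.1) || (!decide (b.1 < a.1) && decide (a.2 < b.2))) x acc) acc).Pairwise
      pvLexLe := by
  induction xs generalizing acc with
  | nil => exact h
  | cons x xs ih => exact ih _ (insertBy_lex_pairwise x acc h)

theorem sorted2_eq (xs l : List (Int × Int)) (hperm : l.Perm xs)
    (hp : l.Pairwise (fun a b => a.1 < b.1)) :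
    PySem.List.sorted2 xs Prod.fst Prod.snd = l := by
  have hs : (PySem.List.sorted2 xs Prod.fst Prod.snd).Pairwise pvLexLe := by
    have := foldl_insertBy_lex_pairwise xs [] (by simp)
    simpa [PySem.List.sorted2] using this
  have hl : l.Pairwise pvLexLe := hp.imp (fun h => Or.inl h)
  refine List.Perm.eq_of_pairwise ?_ hs hl ?_
  · intro a b _ _ hab hba
    unfold pvLexLe at hab hba
    have h1 : a.1 = b.1 := by omega
    have h2 : a.2 = b.2 := by omega
    exact Prod.ext h1 h2
  · exact (PySem.List.sorted2_perm xs Prod.fst Prod.snd false).trans hperm.symm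

-- ---- B side: adjacent-run collapsing of a list sorted (≤) on the first component ----

theorem mem_fst_collapseRuns (l : List (Int × Int)) (q : Int × Int)
    (hq : q ∈ collapseRuns l) : q.1 ∈ l.map Prod.fst := by
  induction l using collapseRuns.induct with
  | case1 => simp [collapseRuns] at hq
  | case2 p rest ih =>
    simp only [collapseRuns, List.mem_cons] at hq
    rcases hq with rfl | hq
    · simp
    · have := ih hq
      have hsub : (rest.dropWhile (fun q => q.1 == p.1)).Sublist rest := List.dropWhile_sublist _
      have : q.1 ∈ rest.map Prod.fst := (hsub.map Prod.fst).mem this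
      simp [this]

-- every element of the dropWhile-rest has a strictly larger first component
theorem dropWhile_fst_lt (p : Int × Int) (rest : List (Int × Int))
    (h : (p :: rest).Pairwise (fun a b => a.1 ≤ b.1)) :
    ∀ q ∈ rest.dropWhile (fun q => q.1 == p.1), p.1 < q.1 := by
  intro q hq
  rw [List.pairwise_cons] at h
  have hle : p.1 ≤ q.1 := h.1 q ((List.dropWhile_sublist _).mem hq)
  -- the head of the dropWhile breaks the run; later elements are ≥ it
  rcases hd : rest.dropWhile (fun q => q.1 == p.1) with _ | ⟨q0, tl⟩
  · rw [hd] at hq; simp at hq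
  · have hq0 : (fun q : Int × Int => q.1 == p.1) q0 = false := by
      have := List.head_dropWhile_not (fun q : Int × Int => q.1 == p.1) (l := rest) (by rw [hd]; simp)
      simpa [hd] using this
    have hq0ne : q0.1 ≠ p.1 := by simpa using hq0
    have hq0le : p.1 ≤ q0.1 := h.1 q0 ((List.dropWhile_sublist _).mem (by rw [hd]; simp))
    have hq0lt : p.1 < q0.1 := lt_of_le_of_ne hq0le (Ne.symm hq0ne)
    rw [hd] at hq
    rcases List.mem_cons.mp hq with rfl | hq
    · exact hq0lt
    · have hrestp : rest.Pairwise (fun a b : Int × Int => a.1 ≤ b.1) := h.2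
      have hdp : (q0 :: tl).Pairwise (fun a b : Int × Int => a.1 ≤ b.1) := by
        rw [← hd]; exact hrestp.sublist (List.dropWhile_sublist _)
      rw [List.pairwise_cons] at hdp
      exact lt_of_lt_of_le hq0lt (hdp.1 q hq)

theorem collapseRuns_snd (l : List (Int × Int)) (h : l.Pairwise (fun a b => a.1 ≤ b.1)) :
    ∀ q ∈ collapseRuns l, q.2 = pvSsum l q.1 := by
  induction l using collapseRuns.induct with
  | case1 => intro q hq; simp [collapseRuns] at hq
  | case2 p rest ih =>
    intro q hq
    have hsplit : rest = rest.takeWhile (fun q => q.1 == p.1) ++ rest.dropWhile (fun q => q.1 == p.1) :=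
      (List.takeWhile_append_dropWhile).symm
    have hrunfst : ∀ r ∈ rest.takeWhile (fun q => q.1 == p.1), r.1 = p.1 := by
      intro r hr
      simpa using List.mem_takeWhile_imp hr
    have hlt := dropWhile_fst_lt p rest h
    simp only [collapseRuns, List.mem_cons] at hq
    rcases hq with rfl | hq
    · -- head of the output: p.2 plus the run's multiplicities
      show p.2 + ((rest.takeWhile (fun q => q.1 == p.1)).map Prod.snd).sum = pvSsum (p :: rest) p.1
      rw [pvSsum_cons, if_pos rfl]
      have : pvSsum rest p.1 = ((rest.takeWhile (fun q => q.1 == p.1)).map Prod.snd).sum := by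
        conv_lhs => rw [hsplit]
        unfold pvSsum
        rw [List.filter_append, List.map_append, List.sum_append]
        have h1 : (rest.takeWhile (fun q => q.1 == p.1)).filter (fun q => q.1 == p.1)
            = rest.takeWhile (fun q => q.1 == p.1) := by
          apply List.filter_eq_self.mpr
          intro a ha; simpa using hrunfst a ha
        have h2 : (rest.dropWhile (fun q => q.1 == p.1)).filter (fun q => q.1 == p.1) = [] := by
          apply List.filter_eq_nil_iff.mpr
          intro a ha
          have := hlt a ha
          simp; omega
        rw [h1, h2]; simp
      omega
    · -- recursive part: its keys are > p.1, so the p-run contributes nothing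
      have hrest' : (rest.dropWhile (fun q => q.1 == p.1)).Pairwise (fun a b : Int × Int => a.1 ≤ b.1) :=
        (List.pairwise_cons.mp h).2.sublist (List.dropWhile_sublist _)
      have hrec := ih hrest' q hq
      have hqfst : p.1 < q.1 := by
        have := mem_fst_collapseRuns _ q hq
        rcases List.mem_map.mp this with ⟨r, hr, hrq⟩
        have := hlt r hr
        omega
      rw [hrec]
      conv_rhs => rw [pvSsum_cons]
      rw [if_neg (by omega)]
      conv_rhs => rw [hsplit]
      unfold pvSsum
      rw [List.filter_append, List.map_append, List.sum_append]
      have h1 : (rest.takeWhile (fun r => r.1 == p.1)).filter (fun r => r.1 == q.1) = [] := by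
        apply List.filter_eq_nil_iff.mpr
        intro a ha
        have := hrunfst a ha
        simp; omega
      rw [h1]; simp

theorem collapseRuns_pairwise (l : List (Int × Int)) (h : l.Pairwise (fun a b => a.1 ≤ b.1)) :
    (collapseRuns l).Pairwise (fun a b => a.1 < b.1) := by
  induction l using collapseRuns.induct with
  | case1 => simp [collapseRuns]
  | case2 p rest ih =>
    simp only [collapseRuns]
    rw [List.pairwise_cons]
    have hrest' : (rest.dropWhile (fun q => q.1 == p.1)).Pairwise (fun a b : Int × Int => a.1 ≤ b.1) :=
      (List.pairwise_cons.mp h).2.sublist (List.dropWhile_sublist _)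
    refine ⟨?_, ih hrest'⟩
    intro q hq
    have := mem_fst_collapseRuns _ q hq
    rcases List.mem_map.mp this with ⟨r, hr, hrq⟩
    have := dropWhile_fst_lt p rest h r hr
    show p.1 < q.1
    omega

theorem mem_fst_collapseRuns_iff (l : List (Int × Int)) (k : Int) :
    k ∈ (collapseRuns l).map Prod.fst ↔ k ∈ l.map Prod.fst := by
  induction l using collapseRuns.induct with
  | case1 => simp [collapseRuns]
  | case2 p rest ih =>
    simp only [collapseRuns]
    constructor
    · intro hk
      simp only [List.map_cons, List.mem_cons] at hk
      rcases hk with rfl | hk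
      · simp
      · have := ih.mp (by simpa using hk)
        rcases List.mem_map.mp this with ⟨r, hr, hrk⟩
        have : r ∈ rest := (List.dropWhile_sublist _).mem hr
        simp only [List.map_cons, List.mem_cons]
        exact Or.inr (List.mem_map.mpr ⟨r, this, hrk⟩)
    · intro hk
      simp only [List.map_cons, List.mem_cons] at hk
      rcases hk with rfl | hk
      · simp
      · rcases List.mem_map.mp hk with ⟨r, hr, hrk⟩
        by_cases hcase : r.1 = p.1
        · simp [← hrk, hcase]
        · have hsplit : rest = rest.takeWhile (fun q => q.1 == p.1) ++ rest.dropWhile (fun q => q.1 == p.1) :=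
            (List.takeWhile_append_dropWhile).symm
          rw [hsplit] at hr
          rcases List.mem_append.mp hr with hr | hr
          · exact absurd (by simpa using List.mem_takeWhile_imp hr) hcase
          · have : k ∈ (rest.dropWhile (fun q => q.1 == p.1)).map Prod.fst :=
              List.mem_map.mpr ⟨r, hr, hrk⟩
            simp only [List.map_cons, List.mem_cons]
            exact Or.inr (ih.mpr this)

-- collapseRuns of a key-sorted list, written as a map over its own key list
theorem collapseRuns_eq_map (l : List (Int × Int)) (h : l.Pairwise (fun a b => a.1 ≤ b.1)) :
    collapseRuns l = ((collapseRuns l).map Prod.fst).map (fun k => (k, pvSsum l k)) := by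
  rw [List.map_map]
  conv_lhs => rw [← List.map_id (collapseRuns l)]
  apply List.map_congr_left
  intro q hq
  have := collapseRuns_snd l h q hq
  simp only [id, Function.comp]
  exact Prod.ext rfl this

-- ---- putting the two sides together ----

theorem master (pairs : List (Int × Int)) :
    PySem.List.sorted2
        ((pairs.foldl (fun d p => d.modify p.1 0 (· + p.2)) PySem.Dict.empty).items)
        Prod.fst Prod.snd
      = collapseRuns (PySem.List.sorted pairs Prod.fst) := by
  set ys := PySem.List.sorted pairs Prod.fst with hys
  have hyp : ys.Pairwise (fun a b => a.1 ≤ b.1) := PySem.List.sorted_pairwise pairs Prod.fst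
  have hyperm : ys.Perm pairs := PySem.List.sorted_perm pairs Prod.fst false
  rw [itemsA]
  apply sorted2_eq
  · -- collapseRuns ys is a permutation of the mapped key-set list
    have hB : collapseRuns ys = ((collapseRuns ys).map Prod.fst).map (fun k => (k, pvSsum pairs k)) := by
      conv_lhs => rw [collapseRuns_eq_map ys hyp]
      exact List.map_congr_left (fun k _ => congrArg (fun v => (k, v)) (pvSsum_perm hyperm k))
    rw [hB]
    apply List.Perm.map
    rw [List.perm_ext_iff_of_nodup ?nd1 (PySem.Set.nodup_ofList _)]
    case nd1 =>
      exact List.pairwise_map.mpr ((collapseRuns_pairwise ys hyp).imp (fun h => ne_of_lt h))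
    intro k
    rw [mem_fst_collapseRuns_iff, PySem.Set.mem_ofList]
    constructor
    · intro hk
      rcases List.mem_map.mp hk with ⟨r, hr, hrk⟩
      exact List.mem_map.mpr ⟨r, hyperm.mem_iff.mp hr, hrk⟩
    · intro hk
      rcases List.mem_map.mp hk with ⟨r, hr, hrk⟩
      exact List.mem_map.mpr ⟨r, hyperm.symm.mem_iff.mp hr, hrk⟩
  · exact collapseRuns_pairwise ys hyp

-- ===== VERDICT (by name: the statement is the Claim_ definition above) =====
theorem formatted_dims_spec : Claim_equal_formatted_dims := by
  intro dims mults _ _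
  unfold Spec_formatted_dims formatted_dims formatted_dims_alt
  cases dims with
  | none => rfl
  | some ds =>
    by_cases h : ds = []
    · simp [h]
    · simp only [h, if_false]
      rw [master (ds.zip mults)]
      rfl
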